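-- pv_equiv track=rewrite | github.com/glennDittmann/Resolving-Partially-Ordered-Traces-Using-Deep-Learning | prior_paper.py | __make_certain_sequences
-- ===== SOURCE A (Python) =====
-- def __make_certain_sequences(trace_set) -> list:
--     '''
--     For each uncertain trace we cut out the certain subtraces, e.g. [{1}, {2,3}, {4}, {5}] -> [[1],[4,5]]
--     And in those we search for an activity sequence to be present
--     Because for an activity sequence to be certain in a trace it must apper in a certain sequence of a trace
--     '''
--     certain_sequences = []
--     certain_sequence = []
--     for i, timestamp in enumerate(trace_set):
--       if len(trace_set[timestamp]) == 1:
--         if i == len(trace_set)-1: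
--           certain_sequence.append(trace_set[timestamp][0])
--           certain_sequences.append(certain_sequence)
--         else:
--           certain_sequence.append(trace_set[timestamp][0])
--       else:
--         if certain_sequence:
--           certain_sequences.append(certain_sequence)
--         certain_sequence = []
--     return certain_sequences
-- ===== SOURCE B (Python) =====
-- def __make_certain_sequences(trace_set) -> list:
--     """Span-based re-implementation: scan the value lists once, and at each
--     certain position extend to the maximal run of certain values in one inner
--     sweep, emitting the whole run at once."""
--     values = list(trace_set.values())
--     n = len(values)
--     runs = []
--     i = 0
--     while i < n:
--         if len(values[i]) != 1:
--             i += 1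
--             continue
--         j = i
--         while j < n and len(values[j]) == 1:
--             j += 1
--         runs.append([values[k][0] for k in range(i, j)])
--         i = j
--     return runs
-- ===== Notes on version B (the rewrite author's own statement) =====
-- stated objective: alternative
-- what changed: Replaces A's indexed accumulator loop (flush on uncertain element, special-cased flush at the last index) by a span-based scan over the value lists that emits each maximal run of certain timestamps in one step, with no per-element dict lookup and no last-element branch.
import Mathlib
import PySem

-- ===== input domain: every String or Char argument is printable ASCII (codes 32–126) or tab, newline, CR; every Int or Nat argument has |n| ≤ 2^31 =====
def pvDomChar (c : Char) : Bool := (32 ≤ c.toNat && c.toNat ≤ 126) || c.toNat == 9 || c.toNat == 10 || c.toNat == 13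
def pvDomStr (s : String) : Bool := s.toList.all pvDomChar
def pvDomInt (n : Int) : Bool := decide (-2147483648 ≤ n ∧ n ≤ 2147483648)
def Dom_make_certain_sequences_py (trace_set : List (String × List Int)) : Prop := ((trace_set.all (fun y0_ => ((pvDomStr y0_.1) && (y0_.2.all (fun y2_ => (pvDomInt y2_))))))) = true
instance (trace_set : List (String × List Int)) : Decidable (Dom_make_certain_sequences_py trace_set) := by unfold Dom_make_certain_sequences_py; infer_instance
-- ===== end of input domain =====

-- B replaces A's flush-on-uncertain accumulator (with its special last-element branch) by a
-- span-based scan that emits each maximal run of certain timestamps at once (objective: alternative).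

-- ===== PORT A =====
-- for i, timestamp in enumerate(trace_set): iterates the dict's keys in insertion order (the
-- association list's first components); trace_set[timestamp] is a dict lookup = first match
-- (the key is always present); trace_set[timestamp][0] is guarded by len == 1, so headD 0 is exact.
def mcsStep (trace_set : List (String × List Int)) (st : List (List Int) × List Int)
    (p : Int × (String × List Int)) : List (List Int) × List Int :=
  let timestamp := p.2.1
  let v := (List.lookup timestamp trace_set).getD []
  if v.length = 1 then
    if p.1 = (trace_set.length : Int) - 1 then
      (st.1 ++ [st.2 ++ [v.headD 0]], st.2 ++ [v.headD 0])
    else (st.1, st.2 ++ [v.headD 0])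
  else ((if st.2 = [] then st.1 else st.1 ++ [st.2]), [])

def make_certain_sequences_py (trace_set : List (String × List Int)) : List (List Int) :=
  ((PySem.List.enumerate trace_set 0).foldl (mcsStep trace_set) ([], [])).1

-- ===== PORT B =====
-- outer while over the values list: skip an uncertain head, or take the maximal certain run
-- (inner while = takeWhile/dropWhile) and emit its heads as one run.
def mcsRuns : List (List Int) → List (List Int)
  | [] => []
  | v :: rest =>
    if v.length = 1 then
      (((v :: rest).takeWhile (fun w => w.length == 1)).map (fun w => w.headD 0))
        :: mcsRuns ((v :: rest).dropWhile (fun w => w.length == 1))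
    else mcsRuns rest
termination_by vs => vs.length
decreasing_by
  · simp only [List.dropWhile_cons]
    simp only [show (fun (w : List Int) => w.length == 1) v = true by simpa using ‹v.length = 1›,
      if_true]
    have := List.length_dropWhile_le (fun (w : List Int) => w.length == 1) rest
    simp only [List.length_cons]; omega
  · simp

def make_certain_sequences_py_alt (trace_set : List (String × List Int)) : List (List Int) :=
  mcsRuns (trace_set.map Prod.snd)

-- ===== PRECONDITION & SPEC =====
-- The argument encodes a Python dict, which cannot hold duplicate keys; Pre_ excludes association
-- lists with duplicate keys, on which a first-match reading of the encoding is accidental.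
def Pre_make_certain_sequences_py (trace_set : List (String × List Int)) : Prop :=
  (trace_set.map Prod.fst).Nodup
instance (trace_set : List (String × List Int)) : Decidable (Pre_make_certain_sequences_py trace_set) := by unfold Pre_make_certain_sequences_py; infer_instance

def pvWitness_make_certain_sequences_py : (List (String × List Int)) :=
  [("a", [1]), ("b", [2, 3]), ("c", [4])]

def Spec_make_certain_sequences_py (trace_set : List (String × List Int)) (out : List (List Int)) : Prop := out = make_certain_sequences_py_alt trace_set
instance (trace_set : List (String × List Int)) (out : List (List Int)) : Decidable (Spec_make_certain_sequences_py trace_set out) := by unfold Spec_make_certain_sequences_py; infer_instance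

-- ===== CLAIM (what is proved, stated in full; the proofs are below) =====
def Claim_equal_make_certain_sequences_py : Prop := ∀ (trace_set : List (String × List Int)), Dom_make_certain_sequences_py trace_set → Pre_make_certain_sequences_py trace_set → Spec_make_certain_sequences_py trace_set (make_certain_sequences_py trace_set)

-- ===== LEMMAS AND PROOFS =====

-- A's loop, freed from indices: the last-element test becomes the singleton pattern.
def loopA (acc : List (List Int)) (cur : List Int) : List (List Int) → List (List Int)
  | [] => acc
  | [v] =>
    if v.length = 1 then acc ++ [cur ++ [v.headD 0]]
    else if cur = [] then acc else acc ++ [cur]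
  | v :: w :: rest =>
    if v.length = 1 then loopA acc (cur ++ [v.headD 0]) (w :: rest)
    else loopA (if cur = [] then acc else acc ++ [cur]) [] (w :: rest)

-- What loopA appends to acc, expressed through mcsRuns.
def runSplit (cur : List Int) : List (List Int) → List (List Int)
  | [] => []
  | v :: rest =>
    if v.length = 1 then
      (cur ++ ((v :: rest).takeWhile (fun w => w.length == 1)).map (fun w => w.headD 0))
        :: mcsRuns ((v :: rest).dropWhile (fun w => w.length == 1))
    else (if cur = [] then [] else [cur]) ++ mcsRuns (v :: rest)

lemma lookup_of_mem_nodup (ts : List (String × List Int)) (p : String × List Int)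
    (hnd : (ts.map Prod.fst).Nodup) (hm : p ∈ ts) : List.lookup p.1 ts = some p.2 := by
  induction ts with
  | nil => cases hm
  | cons q ts ih =>
    simp only [List.map_cons, List.nodup_cons] at hnd
    rcases List.mem_cons.1 hm with rfl | hm'
    · simp [List.lookup]
    · have hne : p.1 ≠ q.1 := fun h => hnd.1 (h ▸ List.mem_map_of_mem hm')
      rw [List.lookup, show (p.1 == q.1) = false from beq_eq_false_iff_ne.mpr hne]
      exact ih hnd.2 hm'

lemma fold_eq_loopA (ts : List (String × List Int)) :
    ∀ (l : List (String × List Int)) (s : Int) (acc : List (List Int)) (cur : List Int),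
      (ts.length : Int) = s + l.length →
      (∀ p ∈ l, List.lookup p.1 ts = some p.2) →
      ((PySem.List.enumerate l s).foldl (mcsStep ts) (acc, cur)).1
        = loopA acc cur (l.map Prod.snd) := by
  intro l
  induction l with
  | nil => intro s acc cur h hlk; simp [PySem.List.enumerate_nil, loopA]
  | cons q rest ih =>
    intro s acc cur h hlk
    rw [PySem.List.enumerate_cons, List.foldl_cons]
    have hq : List.lookup q.1 ts = some q.2 := hlk q (List.mem_cons_self)
    cases rest with
    | nil =>
      have hs : s = (ts.length : Int) - 1 := by simp at h; omega
      by_cases hv : q.2.length = 1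
      · simp [mcsStep, hq, hv, hs, PySem.List.enumerate_nil, loopA]
      · simp [mcsStep, hq, hv, PySem.List.enumerate_nil, loopA]
    | cons w rest' =>
      have hs : ¬ (s = (ts.length : Int) - 1) := by
        simp only [List.length_cons] at h; push_cast at h; omega
      by_cases hv : q.2.length = 1
      · simp only [mcsStep, hq, Option.getD_some, hv, if_true, hs, if_false]
        rw [ih (s + 1) _ _ (by simp only [List.length_cons] at h ⊢; push_cast at h ⊢; omega)
          (fun p hp => hlk p (List.mem_cons_of_mem q hp))]
        simp [loopA, hv]
      · simp only [mcsStep, hq, Option.getD_some, hv, if_false]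
        rw [ih (s + 1) _ _ (by simp only [List.length_cons] at h ⊢; push_cast at h ⊢; omega)
          (fun p hp => hlk p (List.mem_cons_of_mem q hp))]
        simp [loopA, hv]

lemma loopA_eq : ∀ (vs : List (List Int)) (acc : List (List Int)) (cur : List Int),
    loopA acc cur vs = acc ++ runSplit cur vs := by
  intro vs
  induction vs with
  | nil => intro acc cur; simp [loopA, runSplit]
  | cons v rest ih =>
    intro acc cur
    cases rest with
    | nil =>
      by_cases hv : v.length = 1
      · simp [loopA, runSplit, hv, List.takeWhile, List.dropWhile, mcsRuns]
      · by_cases hc : cur = [] <;> simp [loopA, runSplit, hv, hc, mcsRuns]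
    | cons w rest' =>
      by_cases hv : v.length = 1
      · rw [show loopA acc cur (v :: w :: rest') = loopA acc (cur ++ [v.headD 0]) (w :: rest')
            from by simp [loopA, hv]]
        rw [ih]
        congr 1
        by_cases hw : w.length = 1
        · simp [runSplit, hv, hw]
        · simp [runSplit, hv, hw, mcsRuns]
      · rw [show loopA acc cur (v :: w :: rest') =
              loopA (if cur = [] then acc else acc ++ [cur]) [] (w :: rest')
            from by simp [loopA, hv]]
        rw [ih]
        have hrs : runSplit ([] : List Int) (w :: rest') = mcsRuns (w :: rest') := by
          by_cases hw : w.length = 1 <;> simp [runSplit, mcsRuns, hw]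
        rw [hrs, show runSplit cur (v :: w :: rest')
              = (if cur = [] then [] else [cur]) ++ mcsRuns (v :: w :: rest') from by
            simp [runSplit, hv],
          show mcsRuns (v :: w :: rest') = mcsRuns (w :: rest') from by simp [mcsRuns, hv]]
        by_cases hc : cur = [] <;> simp [hc]

lemma runSplit_nil : ∀ vs : List (List Int), runSplit [] vs = mcsRuns vs := by
  intro vs
  cases vs with
  | nil => simp [runSplit, mcsRuns]
  | cons v rest => by_cases hv : v.length = 1 <;> simp [runSplit, mcsRuns, hv]

-- ===== VERDICT (by name: the statement is the Claim_ definition above) =====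
theorem make_certain_sequences_py_spec : Claim_equal_make_certain_sequences_py := by
  intro ts _ hpre
  unfold Spec_make_certain_sequences_py make_certain_sequences_py make_certain_sequences_py_alt
  rw [fold_eq_loopA ts ts 0 [] [] (by simp)
    (fun p hp => lookup_of_mem_nodup ts p hpre hp)]
  rw [loopA_eq, runSplit_nil]
  simp
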